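-- pv_equiv track=rewrite | github.com/UMMC2026/nfl | something/diagnostic_audit.py | analyze_direction_distribution
-- ===== SOURCE A (Python) =====
-- from typing import Dict, List, Tuple, Optional
-- from collections import defaultdict
--
-- def analyze_direction_distribution(signals: List[Dict]) -> Tuple[Dict[str, int], Dict[str, Dict[str, int]]]:
--     """Analyze direction distribution overall and by stat."""
--     direction_counts = defaultdict(int)
--     direction_by_stat = defaultdict(lambda: defaultdict(int))
--
--     for signal in signals:
--         direction = signal.get('direction', '').lower()
--         stat = signal.get('market', signal.get('stat', signal.get('prop_type', ''))).lower()
--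
--         direction_counts[direction] += 1
--         direction_by_stat[stat][direction] += 1
--
--     return dict(direction_counts), {k: dict(v) for k, v in direction_by_stat.items()}
-- ===== SOURCE B (Python) =====
-- def analyze_direction_distribution(signals):
--     """Analyze direction distribution overall and by stat."""
--     pairs = [
--         (sig.get('direction', '').lower(),
--          sig.get('market', sig.get('stat', sig.get('prop_type', ''))).lower())
--         for sig in signals
--     ]
--
--     def dedup(xs):
--         seen = []
--         for x in xs:
--             if x not in seen:
--                 seen.append(x)
--         return seen
--
--     dirs = [d for d, _ in pairs]
--     direction_counts = {d: dirs.count(d) for d in dedup(dirs)}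
--
--     direction_by_stat = {}
--     for s in dedup([st for _, st in pairs]):
--         ds = [d for d, st in pairs if st == s]
--         direction_by_stat[s] = {d: ds.count(d) for d in dedup(ds)}
--
--     return direction_counts, direction_by_stat
-- ===== Notes on version B (the rewrite author's own statement) =====
-- stated objective: alternative
-- what changed: A counts incrementally in one pass over two defaultdicts; B first extracts all (direction, stat) pairs, then builds each result table by listing the distinct keys in first-appearance order (a dedup helper) and counting each key's occurrences with list.count over the extracted lists (filtered per stat for the nested table).
import Mathlib
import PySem

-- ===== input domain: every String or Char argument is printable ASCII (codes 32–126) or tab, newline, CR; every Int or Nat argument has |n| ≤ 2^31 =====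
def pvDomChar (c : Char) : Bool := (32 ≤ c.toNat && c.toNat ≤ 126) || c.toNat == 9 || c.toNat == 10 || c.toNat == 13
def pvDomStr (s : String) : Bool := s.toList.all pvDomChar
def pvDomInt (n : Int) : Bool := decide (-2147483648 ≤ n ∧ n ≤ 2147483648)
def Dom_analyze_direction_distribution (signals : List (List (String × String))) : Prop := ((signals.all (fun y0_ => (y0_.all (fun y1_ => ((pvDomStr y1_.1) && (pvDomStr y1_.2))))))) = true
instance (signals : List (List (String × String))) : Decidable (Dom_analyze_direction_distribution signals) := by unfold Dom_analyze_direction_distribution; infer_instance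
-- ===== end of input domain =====

-- B replaces A's one-pass incremental defaultdict counting by staged passes: extract the
-- (direction, stat) pairs, then build each table from the distinct keys (first-appearance
-- dedup) with list.count scans. Alternative decomposition, same return value; no mutation.

-- ===== PORT A =====
-- shared extraction: direction = signal.get('direction','').lower(),
-- stat = signal.get('market', signal.get('stat', signal.get('prop_type',''))).lower()
def pvExtract (signal : List (String × String)) : String × String :=
  (PySem.Str.lower ((PySem.Dict.ofList signal).getD "direction" ""),
   PySem.Str.lower ((PySem.Dict.ofList signal).getD "market"
     ((PySem.Dict.ofList signal).getD "stat" ((PySem.Dict.ofList signal).getD "prop_type" ""))))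

def analyze_direction_distribution (signals : List (List (String × String))) : (List (String × Int)) × (List (String × List (String × Int))) :=
  -- the for-loop carrying (direction_counts, direction_by_stat); defaultdict 'd[k] += 1'
  -- is d.modify k 0 (·+1), and the nested defaultdict update is modify with empty default
  let st := signals.foldl
    (fun (acc : PySem.Dict String Int × PySem.Dict String (PySem.Dict String Int)) signal =>
      let p := pvExtract signal
      (acc.1.modify p.1 0 (· + 1),
       acc.2.modify p.2 PySem.Dict.empty (fun inner => inner.modify p.1 0 (· + 1))))
    (PySem.Dict.empty, PySem.Dict.empty)
  (st.1.items, st.2.items.map (fun kv => (kv.1, kv.2.items)))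

-- ===== PORT B =====
-- Source B's dedup helper: seen-list accumulation of first occurrences
def pvDedup (xs : List String) : List String :=
  xs.foldl (fun seen x => if seen.contains x then seen else seen ++ [x]) []

def analyze_direction_distribution_alt (signals : List (List (String × String))) : (List (String × Int)) × (List (String × List (String × Int))) :=
  let pairs := signals.map pvExtract
  let dirs := pairs.map (·.1)
  let direction_counts := (pvDedup dirs).map (fun d => (d, (dirs.count d : Int)))
  let direction_by_stat := (pvDedup (pairs.map (·.2))).map (fun s =>
    let ds := (pairs.filter (fun p => p.2 == s)).map (·.1)
    (s, (pvDedup ds).map (fun d => (d, (ds.count d : Int)))))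
  (direction_counts, direction_by_stat)

-- ===== PRECONDITION & SPEC =====
def Spec_analyze_direction_distribution (signals : List (List (String × String))) (out : (List (String × Int)) × (List (String × List (String × Int)))) : Prop := out = analyze_direction_distribution_alt signals
instance (signals : List (List (String × String))) (out : (List (String × Int)) × (List (String × List (String × Int)))) : Decidable (Spec_analyze_direction_distribution signals out) := by unfold Spec_analyze_direction_distribution; infer_instance

-- ===== CLAIM (what is proved, stated in full; the proofs are below) =====
def Claim_equal_analyze_direction_distribution : Prop := ∀ (signals : List (List (String × String))), Dom_analyze_direction_distribution signals → Spec_analyze_direction_distribution signals (analyze_direction_distribution signals)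

-- ===== LEMMAS AND PROOFS =====

-- Source B's dedup is set(xs) in first-appearance order
theorem pvDedup_eq_ofList (xs : List String) : pvDedup xs = PySem.Set.ofList xs := rfl

-- A's nested fold, looked up at a stat s, is the counter fold of the directions filtered to s
theorem pvNestedGetD (ps : List (String × String)) (d : PySem.Dict String (PySem.Dict String Int)) (s : String) :
    (ps.foldl (fun d p => d.modify p.2 PySem.Dict.empty (fun inner => inner.modify p.1 0 (· + 1))) d).getD s PySem.Dict.empty
      = ((ps.filter (fun p => p.2 == s)).map (·.1)).foldl (fun c x => c.modify x 0 (· + 1)) (d.getD s PySem.Dict.empty) := by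
  induction ps generalizing d with
  | nil => rfl
  | cons p rest ih =>
    simp only [List.foldl_cons, List.filter_cons, ih]
    by_cases h : p.2 = s
    · simp [h, PySem.Dict.getD_modify_self]
    · have hb : (p.2 == s) = false := beq_false_of_ne h
      rw [PySem.Dict.getD_modify, if_neg (fun hc => h (Eq.symm hc))]
      simp [hb]

-- ===== VERDICT (by name: the statement is the Claim_ definition above) =====
theorem analyze_direction_distribution_spec : Claim_equal_analyze_direction_distribution := by
  intro signals _
  unfold Spec_analyze_direction_distribution analyze_direction_distribution analyze_direction_distribution_alt
  rw [PySem.List.foldl_prod_mk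
        (f := fun (d : PySem.Dict String Int) signal => d.modify (pvExtract signal).1 0 (· + 1))
        (g := fun (d : PySem.Dict String (PySem.Dict String Int)) signal =>
          d.modify (pvExtract signal).2 PySem.Dict.empty (fun inner => inner.modify (pvExtract signal).1 0 (· + 1)))]
  refine Prod.ext ?_ ?_
  · -- overall counts: A's fold is counter(dirs), whose items are the dedup/count map
    show (signals.foldl (fun (d : PySem.Dict String Int) signal => d.modify (pvExtract signal).1 0 (· + 1)) PySem.Dict.empty).items = _
    rw [← List.foldl_map (f := fun signal => (pvExtract signal).1)
          (g := fun (d : PySem.Dict String Int) x => d.modify x 0 (· + 1)),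
        ← PySem.Dict.counter_eq_foldl, PySem.Dict.items_counter]
    simp [pvDedup_eq_ofList, Function.comp_def]
  · -- nested table
    show ((signals.foldl (fun (d : PySem.Dict String (PySem.Dict String Int)) signal =>
            d.modify (pvExtract signal).2 PySem.Dict.empty (fun inner => inner.modify (pvExtract signal).1 0 (· + 1)))
            PySem.Dict.empty).items).map (fun kv => (kv.1, kv.2.items)) = _
    rw [← List.foldl_map (f := pvExtract)
          (g := fun (d : PySem.Dict String (PySem.Dict String Int)) (p : String × String) =>
            d.modify p.2 PySem.Dict.empty (fun inner => inner.modify p.1 0 (· + 1)))]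
    have hn : ((signals.map pvExtract).foldl
        (fun (d : PySem.Dict String (PySem.Dict String Int)) p =>
          d.modify p.2 PySem.Dict.empty (fun inner => inner.modify p.1 0 (· + 1)))
        PySem.Dict.empty).keys.Nodup :=
      PySem.Dict.nodup_keys_foldl_modify_key (signals.map pvExtract) (fun p => p.2)
        PySem.Dict.empty (fun _ p => fun inner => inner.modify p.1 0 (· + 1)) PySem.Dict.empty
        PySem.Dict.nodup_keys_empty
    rw [PySem.Dict.items_eq_map_keys _ hn PySem.Dict.empty,
        PySem.Dict.keys_foldl_modify_key, PySem.Dict.keys_empty,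
        PySem.Set.update_nil_left, List.map_map]
    simp only [pvDedup_eq_ofList, Function.comp_def, List.map_map]
    refine List.map_congr_left (fun s hs => ?_)
    rw [pvNestedGetD, PySem.Dict.getD_empty, ← PySem.Dict.counter_eq_foldl,
        PySem.Dict.items_counter]
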